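-- pv_equiv track=rewrite | github.com/pypi-data/pypi-mirror-403 | packages/iris-pgwire/iris_pgwire-1.2.25.tar.gz/iris_pgwire-1.2.25/src/iris_pgwire/sql_translator/boolean_translator.py | _find_protected_regions
-- ===== SOURCE A (Python) =====
-- def _find_protected_regions(sql: str) -> list[tuple[int, int]]:
--     """
--     Find regions that should not be modified (strings and comments).
--
--     Returns:
--         List of (start, end) tuples for protected regions
--     """
--     regions = []
--     i = 0
--     n = len(sql)
--
--     while i < n:
--         # Check for single-quoted string
--         if sql[i] == "'":
--             start = i
--             i += 1
--             while i < n: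
--                 if sql[i] == "'" and i + 1 < n and sql[i + 1] == "'":
--                     # Escaped quote, skip both
--                     i += 2
--                 elif sql[i] == "'":
--                     # End of string
--                     i += 1
--                     break
--                 else:
--                     i += 1
--             regions.append((start, i))
--             continue
--
--         # Check for line comment
--         if sql[i : i + 2] == "--":
--             start = i
--             # Find end of line
--             newline = sql.find("\n", i)
--             if newline == -1:
--                 i = n
--             else:
--                 i = newline + 1
--             regions.append((start, i))
--             continue
--
--         # Check for block comment
--         if sql[i : i + 2] == "/*":
--             start = i
--             # Find end of block comment
--             end = sql.find("*/", i + 2)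
--             if end == -1:
--                 i = n
--             else:
--                 i = end + 2
--             regions.append((start, i))
--             continue
--
--         i += 1
--
--     return regions
-- ===== SOURCE B (Python) =====
-- def _find_protected_regions(sql: str) -> list[tuple[int, int]]:
--     """Single-pass mode automaton: one for-loop over characters with a small
--     state machine (normal / string / line comment / block comment) instead of
--     an outer while-loop with nested scans and str.find calls."""
--     regions = []
--     mode = 0  # 0 normal, 1 in string, 2 in line comment, 3 in block comment
--     start = 0
--     skip = 0
--     for i, ch in enumerate(sql):
--         if skip:
--             skip -= 1
--             continue
--         if mode == 0:
--             if ch == "'":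
--                 mode, start = 1, i
--             elif ch == "-" and sql[i + 1 : i + 2] == "-":
--                 mode, start, skip = 2, i, 1
--             elif ch == "/" and sql[i + 1 : i + 2] == "*":
--                 mode, start, skip = 3, i, 1
--         elif mode == 1:
--             if ch == "'":
--                 if sql[i + 1 : i + 2] == "'":
--                     skip = 1
--                 else:
--                     regions.append((start, i + 1))
--                     mode = 0
--         elif mode == 2:
--             if ch == "\n":
--                 regions.append((start, i + 1))
--                 mode = 0
--         else:
--             if ch == "*" and sql[i + 1 : i + 2] == "/":
--                 regions.append((start, i + 2))
--                 mode = 0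
--                 skip = 1
--     if mode:
--         regions.append((start, len(sql)))
--     return regions
-- ===== Notes on version B (the rewrite author's own statement) =====
-- stated objective: alternative
-- what changed: Replaces A's outer while-loop with three nested scanning constructs (an inner quote-scanning while loop and two str.find searches, plus a two-char slice test per character) by a single for-loop over enumerate(sql) driving a four-mode state machine (normal / string / line comment / block comment) with a skip counter for two-character lookahead.
import Mathlib
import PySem

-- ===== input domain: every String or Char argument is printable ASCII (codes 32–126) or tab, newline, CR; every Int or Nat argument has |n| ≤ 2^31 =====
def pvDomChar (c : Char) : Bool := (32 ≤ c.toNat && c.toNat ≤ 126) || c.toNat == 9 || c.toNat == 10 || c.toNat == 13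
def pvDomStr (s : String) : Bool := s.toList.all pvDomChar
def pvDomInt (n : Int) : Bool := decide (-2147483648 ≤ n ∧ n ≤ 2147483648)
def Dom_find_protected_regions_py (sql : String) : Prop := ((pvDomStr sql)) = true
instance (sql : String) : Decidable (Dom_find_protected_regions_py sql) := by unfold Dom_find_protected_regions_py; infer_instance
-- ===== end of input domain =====

-- B replaces A's outer while-loop with nested scans and str.find calls by a single
-- for-loop over the characters driving a four-mode state machine (objective:
-- alternative decomposition, same asymptotic cost); same results on every input.
-- Python's s.find(sub, start) in A is PySem.Chars.findFrom (exact).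
-- A's while-loops are ported with a fuel argument (s.length + 1, a pure totality
-- guard: each iteration strictly advances the index, so the fuel never runs out).

-- ===== PORT A =====
-- inner while loop of A: scan a single-quoted string starting after the opening quote
def pvAStrEnd (s : List Char) : Nat → Nat → Nat
  | 0, i => i
  | fuel + 1, i =>
    if i < s.length then
      if s.getD i ' ' = '\'' ∧ i + 1 < s.length ∧ s.getD (i + 1) ' ' = '\'' then
        pvAStrEnd s fuel (i + 2)
      else if s.getD i ' ' = '\'' then i + 1
      else pvAStrEnd s fuel (i + 1)
    else i

-- outer while loop of A
def pvALoop (s : List Char) : Nat → Nat → List (Int × Int) → List (Int × Int)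
  | 0, _, regions => regions
  | fuel + 1, i, regions =>
    if i < s.length then
      if s.getD i ' ' = '\'' then
        let j := pvAStrEnd s (s.length + 1) (i + 1)
        pvALoop s fuel j (regions ++ [((i : Int), (j : Int))])
      else if (s.drop i).take 2 = ['-', '-'] then
        let nl := PySem.Chars.findFrom s ['\n'] (i : Int)
        let j := if nl = -1 then s.length else nl.toNat + 1
        pvALoop s fuel j (regions ++ [((i : Int), (j : Int))])
      else if (s.drop i).take 2 = ['/', '*'] then
        let e := PySem.Chars.findFrom s ['*', '/'] ((i + 2 : Nat) : Int)
        let j := if e = -1 then s.length else e.toNat + 2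
        pvALoop s fuel j (regions ++ [((i : Int), (j : Int))])
      else pvALoop s fuel (i + 1) regions
    else regions

def find_protected_regions_py (sql : String) : List (Int × Int) :=
  pvALoop sql.toList (sql.toList.length + 1) 0 []

-- ===== PORT B =====
-- B's single for-loop: structural recursion over the remaining characters, carrying
-- the loop index i, the automaton mode (0 normal, 1 string, 2 line comment,
-- 3 block comment), the pending region start, the skip counter and the regions list;
-- the Python lookahead sql[i+1:i+2] is rest.take 1.
def pvBRun : List Char → Nat → Nat → Nat → Nat → List (Int × Int) → List (Int × Int)
  | [], i, mode, start, _, regions =>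
      if mode ≠ 0 then regions ++ [((start : Int), (i : Int))] else regions
  | c :: rest, i, mode, start, skip, regions =>
      if skip ≠ 0 then pvBRun rest (i + 1) mode start (skip - 1) regions
      else if mode = 0 then
        if c = '\'' then pvBRun rest (i + 1) 1 i 0 regions
        else if c = '-' ∧ rest.take 1 = ['-'] then pvBRun rest (i + 1) 2 i 1 regions
        else if c = '/' ∧ rest.take 1 = ['*'] then pvBRun rest (i + 1) 3 i 1 regions
        else pvBRun rest (i + 1) 0 start 0 regions
      else if mode = 1 then
        if c = '\'' then
          if rest.take 1 = ['\''] then pvBRun rest (i + 1) 1 start 1 regions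
          else pvBRun rest (i + 1) 0 start 0 (regions ++ [((start : Int), ((i + 1 : Nat) : Int))])
        else pvBRun rest (i + 1) 1 start 0 regions
      else if mode = 2 then
        if c = '\n' then pvBRun rest (i + 1) 0 start 0 (regions ++ [((start : Int), ((i + 1 : Nat) : Int))])
        else pvBRun rest (i + 1) 2 start 0 regions
      else
        if c = '*' ∧ rest.take 1 = ['/'] then pvBRun rest (i + 1) 0 start 1 (regions ++ [((start : Int), ((i + 2 : Nat) : Int))])
        else pvBRun rest (i + 1) 3 start 0 regions

def find_protected_regions_py_alt (sql : String) : List (Int × Int) :=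
  pvBRun sql.toList 0 0 0 0 []

-- ===== PRECONDITION & SPEC =====
def Spec_find_protected_regions_py (sql : String) (out : List (Int × Int)) : Prop := out = find_protected_regions_py_alt sql
instance (sql : String) (out : List (Int × Int)) : Decidable (Spec_find_protected_regions_py sql out) := by unfold Spec_find_protected_regions_py; infer_instance

-- ===== CLAIM (what is proved, stated in full; the proofs are below) =====
def Claim_equal_find_protected_regions_py : Prop := ∀ (sql : String), Dom_find_protected_regions_py sql → Spec_find_protected_regions_py sql (find_protected_regions_py sql)

-- ===== LEMMAS AND PROOFS =====

theorem pvDrop_cons (s : List Char) (j : Nat) (hj : j < s.length) :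
    s.drop j = s.getD j ' ' :: s.drop (j + 1) := by
  rw [List.getD_eq_getElem s ' ' hj, List.drop_eq_getElem_cons hj]

theorem pvTakeOne (s : List Char) (j : Nat) (c : Char) :
    (s.drop (j + 1)).take 1 = [c] ↔ (j + 1 < s.length ∧ s.getD (j + 1) ' ' = c) := by
  constructor
  · intro h
    have hlen : j + 1 < s.length := by
      by_contra hx
      have : s.drop (j + 1) = [] := List.drop_eq_nil_of_le (by omega)
      simp [this] at h
    rw [pvDrop_cons s (j + 1) hlen] at h
    simp at h
    exact ⟨hlen, h⟩
  · rintro ⟨hlen, hc⟩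
    rw [pvDrop_cons s (j + 1) hlen, hc]
    simp

-- a prefix match at k ≥ i is an infix of the suffix from i
theorem pvNoInfix (s sub : List Char) (i k : Nat) (hik : i ≤ k)
    (hpre : sub <+: s.drop k) : sub <:+: s.drop i := by
  have hdd : s.drop k = List.drop (k - i) (s.drop i) := by
    rw [List.drop_drop]; congr 1; omega
  rw [hdd] at hpre
  exact List.infix_iff_prefix_suffix.mpr ⟨_, hpre, List.drop_suffix _ _⟩

-- findFrom at the empty suffix is -1
theorem pvFindFrom_end (s sub : List Char) (hsub : sub ≠ []) :
    PySem.Chars.findFrom s sub ((s.length : Nat) : Int) none = -1 := by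
  rw [PySem.Chars.findFrom_natCast_eq_neg_one_iff s sub s.length le_rfl]
  intro hinf
  have hlen := hinf.length_le
  simp only [List.length_drop] at hlen
  have hpos := List.length_pos_of_ne_nil hsub
  omega

-- a hit at the search position: findFrom returns exactly it
theorem pvFindFrom_hit (s sub : List Char) (j : Nat) (hj : j ≤ s.length)
    (hpre : sub <+: s.drop j) :
    PySem.Chars.findFrom s sub (j : Int) none = (j : Int) := by
  have hne : PySem.Chars.findFrom s sub (j : Int) none ≠ -1 := by
    rw [Ne, PySem.Chars.findFrom_natCast_eq_neg_one_iff s sub j hj]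
    exact fun h => h (pvNoInfix s sub j j le_rfl hpre)
  obtain ⟨h1, _, h3⟩ := PySem.Chars.findFrom_natCast_spec s sub j hj hne
  set F := PySem.Chars.findFrom s sub (j : Int) none with hF
  have hle : F.toNat ≤ j := by
    by_contra hx
    exact h3 j le_rfl (by omega) hpre
  omega

-- a miss at the search position: findFrom steps past it
theorem pvFindFrom_step (s sub : List Char) (j : Nat) (hj : j < s.length)
    (hmiss : ¬ sub <+: s.drop j) :
    PySem.Chars.findFrom s sub (j : Int) none =
      PySem.Chars.findFrom s sub ((j + 1 : Nat) : Int) none := by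
  by_cases hR : PySem.Chars.findFrom s sub ((j + 1 : Nat) : Int) none = -1
  · rw [hR, PySem.Chars.findFrom_natCast_eq_neg_one_iff s sub j (by omega)]
    have hno := (PySem.Chars.findFrom_natCast_eq_neg_one_iff s sub (j + 1) (by omega)).mp hR
    intro hinf
    obtain ⟨t, hpre, hsuf⟩ := List.infix_iff_prefix_suffix.mp hinf
    obtain ⟨u, hu⟩ := hsuf
    have ht : t = s.drop (j + u.length) := by
      have : t = (s.drop j).drop u.length := by rw [← hu]; simp
      rw [this, List.drop_drop]
    rw [ht] at hpre
    rcases Nat.eq_zero_or_pos u.length with hk0 | hkpos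
    · exact hmiss (by simpa [hk0] using hpre)
    · exact hno (pvNoInfix s sub (j + 1) (j + u.length) (by omega) hpre)
  · obtain ⟨h1, h2, h3⟩ := PySem.Chars.findFrom_natCast_spec s sub (j + 1) (by omega) hR
    set q := PySem.Chars.findFrom s sub ((j + 1 : Nat) : Int) none with hq
    have hLne : PySem.Chars.findFrom s sub (j : Int) none ≠ -1 := by
      rw [Ne, PySem.Chars.findFrom_natCast_eq_neg_one_iff s sub j (by omega)]
      exact fun h => h (pvNoInfix s sub j q.toNat (by omega) h2)
    obtain ⟨g1, g2, g3⟩ := PySem.Chars.findFrom_natCast_spec s sub j (by omega) hLne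
    set p := PySem.Chars.findFrom s sub (j : Int) none with hp
    have hpj : p.toNat ≠ j := fun h => hmiss (h ▸ g2)
    have hple : p.toNat ≤ q.toNat := by
      by_contra hx
      exact g3 q.toNat (by omega) (by omega) h2
    have hqle : q.toNat ≤ p.toNat := by
      by_contra hx
      exact h3 p.toNat (by omega) (by omega) g2
    omega

theorem pvBridge2 (s : List Char) (k : Nat) (c d : Char) :
    (s.drop k).take 2 = [c, d] ↔ [c, d] <+: s.drop k := by
  rw [List.prefix_iff_eq_take]
  constructor <;> intro h <;> simpa using h.symm

-- a two-char test at position j, rephrased through head and lookahead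
theorem pvTwoChar (s : List Char) (j : Nat) (hj : j < s.length) (c d : Char) :
    (s.getD j ' ' = c ∧ (s.drop (j + 1)).take 1 = [d]) ↔ [c, d] <+: s.drop j := by
  rw [← pvBridge2 s j c d, pvDrop_cons s j hj]
  rw [show (List.take 2 (s.getD j ' ' :: s.drop (j + 1))) = s.getD j ' ' :: (s.drop (j + 1)).take 1 from rfl]
  constructor
  · rintro ⟨h1, h2⟩
    rw [h1, h2]
  · intro h
    exact ⟨((List.cons.injEq _ _ _ _).mp h).1, ((List.cons.injEq _ _ _ _).mp h).2⟩

-- with sufficient fuel, A's inner scan does not depend on the fuel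
theorem pvAStrEnd_fuel (s : List Char) :
    ∀ f1 f2 j, s.length - j < f1 → s.length - j < f2 →
    pvAStrEnd s f1 j = pvAStrEnd s f2 j := by
  intro f1
  induction f1 with
  | zero => intro f2 j h1 _; omega
  | succ f1 ih =>
    intro f2 j h1 h2
    match f2, h2 with
    | f2 + 1, h2 =>
      simp only [pvAStrEnd]
      split_ifs with ha hb hc
      · exact ih f2 (j + 2) (by omega) (by omega)
      · rfl
      · exact ih f2 (j + 1) (by omega) (by omega)
      · rfl

theorem pvAStrEnd_ge (s : List Char) : ∀ f j, j ≤ pvAStrEnd s f j := by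
  intro f
  induction f with
  | zero => intro j; exact le_rfl
  | succ f ih =>
    intro j
    simp only [pvAStrEnd]
    split_ifs with ha hb hc
    · have := ih (j + 2); omega
    · omega
    · have := ih (j + 1); omega
    · omega

theorem pvAStrEnd_le (s : List Char) : ∀ f j, j ≤ s.length → pvAStrEnd s f j ≤ s.length := by
  intro f
  induction f with
  | zero => intro j h; exact h
  | succ f ih =>
    intro j h
    simp only [pvAStrEnd]
    split_ifs with ha hb hc
    · exact ih (j + 2) (by omega)
    · omega
    · exact ih (j + 1) (by omega)
    · omega

-- single-step equations of B's automaton on a cons cell (head given by an equation,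
-- so they apply to any head term)
theorem pvB_skip (c : Char) (rest : List Char) (i m st k : Nat) (acc : List (Int × Int)) :
    pvBRun (c :: rest) i m st (k + 1) acc = pvBRun rest (i + 1) m st k acc := by
  simp [pvBRun]

theorem pvB_m0_quote (c : Char) (rest : List Char) (i st : Nat) (acc : List (Int × Int))
    (hc : c = '\'') :
    pvBRun (c :: rest) i 0 st 0 acc = pvBRun rest (i + 1) 1 i 0 acc := by
  subst hc; simp [pvBRun]

theorem pvB_m0_dash (c : Char) (rest : List Char) (i st : Nat) (acc : List (Int × Int))
    (hc : c = '-') (h1 : rest.take 1 = ['-']) :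
    pvBRun (c :: rest) i 0 st 0 acc = pvBRun rest (i + 1) 2 i 1 acc := by
  subst hc; simp [pvBRun, h1]

theorem pvB_m0_slash (c : Char) (rest : List Char) (i st : Nat) (acc : List (Int × Int))
    (hc : c = '/') (h1 : rest.take 1 = ['*']) :
    pvBRun (c :: rest) i 0 st 0 acc = pvBRun rest (i + 1) 3 i 1 acc := by
  subst hc; simp [pvBRun, h1]

theorem pvB_m0_other (c : Char) (rest : List Char) (i st : Nat) (acc : List (Int × Int))
    (h1 : ¬ c = '\'') (h2 : ¬ (c = '-' ∧ rest.take 1 = ['-']))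
    (h3 : ¬ (c = '/' ∧ rest.take 1 = ['*'])) :
    pvBRun (c :: rest) i 0 st 0 acc = pvBRun rest (i + 1) 0 st 0 acc := by
  simp [pvBRun, h1, h2, h3]

theorem pvB_m1_pair (c : Char) (rest : List Char) (i st : Nat) (acc : List (Int × Int))
    (hc : c = '\'') (h1 : rest.take 1 = ['\'']) :
    pvBRun (c :: rest) i 1 st 0 acc = pvBRun rest (i + 1) 1 st 1 acc := by
  subst hc; simp [pvBRun, h1]

theorem pvB_m1_close (c : Char) (rest : List Char) (i st : Nat) (acc : List (Int × Int))
    (hc : c = '\'') (h1 : ¬ rest.take 1 = ['\'']) :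
    pvBRun (c :: rest) i 1 st 0 acc
      = pvBRun rest (i + 1) 0 st 0 (acc ++ [((st : Int), ((i + 1 : Nat) : Int))]) := by
  subst hc; simp [pvBRun, h1]

theorem pvB_m1_other (c : Char) (rest : List Char) (i st : Nat) (acc : List (Int × Int))
    (hc : ¬ c = '\'') :
    pvBRun (c :: rest) i 1 st 0 acc = pvBRun rest (i + 1) 1 st 0 acc := by
  simp [pvBRun, hc]

theorem pvB_m2_nl (c : Char) (rest : List Char) (i st : Nat) (acc : List (Int × Int))
    (hc : c = '\n') :
    pvBRun (c :: rest) i 2 st 0 acc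
      = pvBRun rest (i + 1) 0 st 0 (acc ++ [((st : Int), ((i + 1 : Nat) : Int))]) := by
  subst hc; simp [pvBRun]

theorem pvB_m2_other (c : Char) (rest : List Char) (i st : Nat) (acc : List (Int × Int))
    (hc : ¬ c = '\n') :
    pvBRun (c :: rest) i 2 st 0 acc = pvBRun rest (i + 1) 2 st 0 acc := by
  simp [pvBRun, hc]

theorem pvB_m3_close (c : Char) (rest : List Char) (i st : Nat) (acc : List (Int × Int))
    (hc : c = '*') (h1 : rest.take 1 = ['/']) :
    pvBRun (c :: rest) i 3 st 0 acc
      = pvBRun rest (i + 1) 0 st 1 (acc ++ [((st : Int), ((i + 2 : Nat) : Int))]) := by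
  subst hc; simp [pvBRun, h1]

theorem pvB_m3_other (c : Char) (rest : List Char) (i st : Nat) (acc : List (Int × Int))
    (hc : ¬ (c = '*' ∧ rest.take 1 = ['/'])) :
    pvBRun (c :: rest) i 3 st 0 acc = pvBRun rest (i + 1) 3 st 0 acc := by
  simp [pvBRun, hc]

theorem pvB_nil (i m st k : Nat) (acc : List (Int × Int)) :
    pvBRun [] i m st k acc
      = if m ≠ 0 then acc ++ [((st : Int), ((i : Nat) : Int))] else acc := by
  simp [pvBRun]

-- B in string mode from position j equals: emit A's string end, return to normal mode
theorem pvString_eq (s : List Char) :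
    ∀ d j start acc, s.length - j = d → j ≤ s.length →
    pvBRun (s.drop j) j 1 start 0 acc =
      pvBRun (s.drop (pvAStrEnd s (s.length + 1) j)) (pvAStrEnd s (s.length + 1) j) 0 start 0
        (acc ++ [((start : Int), ((pvAStrEnd s (s.length + 1) j : Nat) : Int))]) := by
  intro d
  induction d using Nat.strong_induction_on with
  | _ d ih =>
    intro j start acc hd hj
    by_cases hjn : j < s.length
    · rw [pvDrop_cons s j hjn]
      by_cases hq : s.getD j ' ' = '\''
      · by_cases hnx : (s.drop (j + 1)).take 1 = ['\'']
        · -- escaped pair: skip both, recurse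
          have hlen : j + 1 < s.length := ((pvTakeOne s j '\'').mp hnx).1
          have hstep : pvAStrEnd s (s.length + 1) j = pvAStrEnd s (s.length + 1) (j + 2) :=
            calc pvAStrEnd s (s.length + 1) j
                = pvAStrEnd s ((s.length - j + j) + 1) j :=
                  pvAStrEnd_fuel s _ _ j (by omega) (by omega)
              _ = pvAStrEnd s (s.length - j + j) (j + 2) := by
                  simp only [pvAStrEnd]
                  rw [if_pos hjn, if_pos ⟨hq, hlen, ((pvTakeOne s j '\'').mp hnx).2⟩]
              _ = pvAStrEnd s (s.length + 1) (j + 2) :=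
                  pvAStrEnd_fuel s _ _ (j + 2) (by omega) (by omega)
          rw [pvB_m1_pair _ _ _ _ _ hq hnx, pvDrop_cons s (j + 1) hlen, pvB_skip,
            show j + 1 + 1 = j + 2 from by omega, hstep]
          exact ih (s.length - (j + 2)) (by omega) (j + 2) start acc rfl (by omega)
        · -- closing quote
          have hend : pvAStrEnd s (s.length + 1) j = j + 1 := by
            have hno : ¬ (s.getD j ' ' = '\'' ∧ j + 1 < s.length ∧ s.getD (j + 1) ' ' = '\'') := by
              rintro ⟨_, h1, h2⟩
              exact hnx ((pvTakeOne s j '\'').mpr ⟨h1, h2⟩)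
            simp only [pvAStrEnd]
            rw [if_pos hjn, if_neg hno, if_pos hq]
          rw [hend, pvB_m1_close _ _ _ _ _ hq hnx]
      · -- ordinary character inside the string
        have hstep : pvAStrEnd s (s.length + 1) j = pvAStrEnd s (s.length + 1) (j + 1) :=
          calc pvAStrEnd s (s.length + 1) j
              = pvAStrEnd s ((s.length - j + j) + 1) j :=
                pvAStrEnd_fuel s _ _ j (by omega) (by omega)
            _ = pvAStrEnd s (s.length - j + j) (j + 1) := by
                simp only [pvAStrEnd]
                rw [if_pos hjn, if_neg (by tauto), if_neg hq]
            _ = pvAStrEnd s (s.length + 1) (j + 1) :=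
                pvAStrEnd_fuel s _ _ (j + 1) (by omega) (by omega)
        rw [pvB_m1_other _ _ _ _ _ hq, hstep]
        exact ih (s.length - (j + 1)) (by omega) (j + 1) start acc rfl (by omega)
    · -- end of input in string mode
      have hje : j = s.length := by omega
      have hdrop : s.drop j = [] := List.drop_eq_nil_of_le (by omega)
      have hend : pvAStrEnd s (s.length + 1) j = j := by
        simp [pvAStrEnd, show ¬ j < s.length from hjn]
      rw [hend, hdrop]
      simp [pvB_nil]

-- the end a line comment reaches, as A computes it from search position j
def pvNlEnd (s : List Char) (j : Nat) : Nat :=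
  if PySem.Chars.findFrom s ['\n'] (j : Int) none = -1 then s.length
  else (PySem.Chars.findFrom s ['\n'] (j : Int) none).toNat + 1

-- B in line-comment mode from position j equals: emit A's newline end, return to normal
theorem pvLine_eq (s : List Char) :
    ∀ d j start acc, s.length - j = d → j ≤ s.length →
    pvBRun (s.drop j) j 2 start 0 acc =
      pvBRun (s.drop (pvNlEnd s j)) (pvNlEnd s j) 0 start 0
        (acc ++ [((start : Int), ((pvNlEnd s j : Nat) : Int))]) := by
  intro d
  induction d using Nat.strong_induction_on with
  | _ d ih =>
    intro j start acc hd hj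
    by_cases hjn : j < s.length
    · rw [pvDrop_cons s j hjn]
      by_cases hnl : s.getD j ' ' = '\n'
      · have hE : pvNlEnd s j = j + 1 := by
          unfold pvNlEnd
          rw [pvFindFrom_hit s ['\n'] j (by omega) (by
            rw [pvDrop_cons s j hjn, hnl]; exact ⟨_, rfl⟩)]
          simp
        rw [hE, pvB_m2_nl _ _ _ _ _ hnl]
      · have hE : pvNlEnd s j = pvNlEnd s (j + 1) := by
          unfold pvNlEnd
          rw [pvFindFrom_step s ['\n'] j hjn (fun hp => by
            rw [pvDrop_cons s j hjn] at hp
            exact hnl (List.cons_prefix_cons.mp hp).1.symm)]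
        rw [pvB_m2_other _ _ _ _ _ hnl, hE]
        exact ih (s.length - (j + 1)) (by omega) (j + 1) start acc rfl (by omega)
    · have hje : j = s.length := by omega
      have hdrop : s.drop j = [] := List.drop_eq_nil_of_le (by omega)
      have hE : pvNlEnd s j = j := by
        unfold pvNlEnd
        rw [hje, pvFindFrom_end s ['\n'] (by simp)]
        simp
      rw [hE, hdrop]
      simp [pvB_nil]

-- the end a block comment reaches, as A computes it from search position j
def pvBlkEnd (s : List Char) (j : Nat) : Nat :=
  if PySem.Chars.findFrom s ['*', '/'] (j : Int) none = -1 then s.length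
  else (PySem.Chars.findFrom s ['*', '/'] (j : Int) none).toNat + 2

-- B in block-comment mode from position j equals: emit A's close end, return to normal
theorem pvBlock_eq (s : List Char) :
    ∀ d j start acc, s.length - j = d → j ≤ s.length →
    pvBRun (s.drop j) j 3 start 0 acc =
      pvBRun (s.drop (pvBlkEnd s j)) (pvBlkEnd s j) 0 start 0
        (acc ++ [((start : Int), ((pvBlkEnd s j : Nat) : Int))]) := by
  intro d
  induction d using Nat.strong_induction_on with
  | _ d ih =>
    intro j start acc hd hj
    by_cases hjn : j < s.length
    · rw [pvDrop_cons s j hjn]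
      by_cases hcl : s.getD j ' ' = '*' ∧ (s.drop (j + 1)).take 1 = ['/']
      · -- close found here
        have hpre : ['*', '/'] <+: s.drop j := (pvTwoChar s j hjn '*' '/').mp hcl
        have hlen : j + 1 < s.length := ((pvTakeOne s j '/').mp hcl.2).1
        have hE : pvBlkEnd s j = j + 2 := by
          unfold pvBlkEnd
          rw [pvFindFrom_hit s ['*', '/'] j (by omega) hpre]
          simp
        rw [hE, pvB_m3_close _ _ _ _ _ hcl.1 hcl.2, pvDrop_cons s (j + 1) hlen, pvB_skip,
          show j + 1 + 1 = j + 2 from by omega]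
      · have hE : pvBlkEnd s j = pvBlkEnd s (j + 1) := by
          unfold pvBlkEnd
          rw [pvFindFrom_step s ['*', '/'] j hjn
            (fun hp => hcl ((pvTwoChar s j hjn '*' '/').mpr hp))]
        rw [pvB_m3_other _ _ _ _ _ hcl, hE]
        exact ih (s.length - (j + 1)) (by omega) (j + 1) start acc rfl (by omega)
    · have hje : j = s.length := by omega
      have hdrop : s.drop j = [] := List.drop_eq_nil_of_le (by omega)
      have hE : pvBlkEnd s j = j := by
        unfold pvBlkEnd
        rw [hje, pvFindFrom_end s ['*', '/'] (by simp)]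
        simp
      rw [hE, hdrop]
      simp [pvB_nil]

-- bounds on the comment ends
theorem pvNlEnd_bounds (s : List Char) (j : Nat) (hj : j ≤ s.length) :
    pvNlEnd s j ≤ s.length ∧ j ≤ pvNlEnd s j := by
  unfold pvNlEnd
  split_ifs with h
  · omega
  · obtain ⟨h1, h2, _⟩ := PySem.Chars.findFrom_natCast_spec s ['\n'] j hj h
    have hlen := h2.length_le
    simp only [List.length_drop, List.length_cons, List.length_nil] at hlen
    omega

theorem pvBlkEnd_bounds (s : List Char) (j : Nat) (hj : j ≤ s.length) :
    pvBlkEnd s j ≤ s.length ∧ j ≤ pvBlkEnd s j := by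
  unfold pvBlkEnd
  split_ifs with h
  · omega
  · obtain ⟨h1, h2, _⟩ := PySem.Chars.findFrom_natCast_spec s ['*', '/'] j hj h
    have hlen := h2.length_le
    simp only [List.length_drop, List.length_cons, List.length_nil] at hlen
    omega

-- main: A's outer loop from i = B's automaton in normal mode from i
theorem pvMain (s : List Char) :
    ∀ d i fa st acc, s.length - i = d → i ≤ s.length → s.length - i < fa →
    pvALoop s fa i acc = pvBRun (s.drop i) i 0 st 0 acc := by
  intro d
  induction d using Nat.strong_induction_on with
  | _ d ih =>
    intro i fa st acc hd hi hfa
    match fa, hfa with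
    | fa + 1, hfa =>
      by_cases hin : i < s.length
      · rw [pvDrop_cons s i hin]
        by_cases hq : s.getD i ' ' = '\''
        · -- string region
          have hA : pvALoop s (fa + 1) i acc =
              pvALoop s fa (pvAStrEnd s (s.length + 1) (i + 1))
                (acc ++ [((i : Int), ((pvAStrEnd s (s.length + 1) (i + 1) : Nat) : Int))]) := by
            simp only [pvALoop]
            rw [if_pos hin, if_pos hq]
          rw [hA, pvB_m0_quote _ _ _ _ _ hq,
            pvString_eq s (s.length - (i + 1)) (i + 1) i acc rfl (by omega)]
          have hge := pvAStrEnd_ge s (s.length + 1) (i + 1)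
          have hle := pvAStrEnd_le s (s.length + 1) (i + 1) (by omega)
          exact ih (s.length - pvAStrEnd s (s.length + 1) (i + 1)) (by omega) _ fa i _
            rfl hle (by omega)
        · by_cases hdd : (s.drop i).take 2 = ['-', '-']
          · -- line comment region
            have hpair := (pvTwoChar s i hin '-' '-').mpr ((pvBridge2 s i '-' '-').mp hdd)
            have hlen1 : i + 1 < s.length := ((pvTakeOne s i '-').mp hpair.2).1
            -- A's end (searched from i) equals the automaton's end (searched from i + 2)
            have hEeq : pvNlEnd s i = pvNlEnd s (i + 2) := by
              unfold pvNlEnd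
              rw [pvFindFrom_step s ['\n'] i hin (fun hp => by
                  rw [pvDrop_cons s i hin] at hp
                  have := (List.cons_prefix_cons.mp hp).1
                  rw [hpair.1] at this; exact absurd this (by decide)),
                pvFindFrom_step s ['\n'] (i + 1) hlen1 (fun hp => by
                  rw [pvDrop_cons s (i + 1) hlen1] at hp
                  have := (List.cons_prefix_cons.mp hp).1
                  rw [((pvTakeOne s i '-').mp hpair.2).2] at this
                  exact absurd this (by decide))]
            have hA : pvALoop s (fa + 1) i acc =
                pvALoop s fa (pvNlEnd s i)
                  (acc ++ [((i : Int), ((pvNlEnd s i : Nat) : Int))]) := by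
              simp only [pvALoop, pvNlEnd]
              rw [if_pos hin, if_neg hq, if_pos hdd]
            rw [hA, pvB_m0_dash _ _ _ _ _ hpair.1 hpair.2, pvDrop_cons s (i + 1) hlen1,
              pvB_skip, show i + 1 + 1 = i + 2 from by omega,
              pvLine_eq s (s.length - (i + 2)) (i + 2) i acc rfl (by omega), ← hEeq]
            obtain ⟨hub, hlb⟩ := pvNlEnd_bounds s (i + 2) (by omega)
            rw [hEeq]
            exact ih (s.length - pvNlEnd s (i + 2)) (by omega) _ fa i _ rfl hub (by omega)
          · by_cases hbc : (s.drop i).take 2 = ['/', '*']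
            · -- block comment region
              have hpair := (pvTwoChar s i hin '/' '*').mpr ((pvBridge2 s i '/' '*').mp hbc)
              have hlen1 : i + 1 < s.length := ((pvTakeOne s i '*').mp hpair.2).1
              have hA : pvALoop s (fa + 1) i acc =
                  pvALoop s fa (pvBlkEnd s (i + 2))
                    (acc ++ [((i : Int), ((pvBlkEnd s (i + 2) : Nat) : Int))]) := by
                simp only [pvALoop, pvBlkEnd]
                rw [if_pos hin, if_neg hq, if_neg hdd, if_pos hbc]
              rw [hA, pvB_m0_slash _ _ _ _ _ hpair.1 hpair.2, pvDrop_cons s (i + 1) hlen1,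
                pvB_skip, show i + 1 + 1 = i + 2 from by omega,
                pvBlock_eq s (s.length - (i + 2)) (i + 2) i acc rfl (by omega)]
              obtain ⟨hub, hlb⟩ := pvBlkEnd_bounds s (i + 2) (by omega)
              exact ih (s.length - pvBlkEnd s (i + 2)) (by omega) _ fa i _ rfl hub (by omega)
            · -- plain character
              have hA : pvALoop s (fa + 1) i acc = pvALoop s fa (i + 1) acc := by
                simp only [pvALoop]
                rw [if_pos hin, if_neg hq, if_neg hdd, if_neg hbc]
              have hc1 : ¬ (s.getD i ' ' = '-' ∧ (s.drop (i + 1)).take 1 = ['-']) :=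
                fun h => hdd ((pvBridge2 s i '-' '-').mpr ((pvTwoChar s i hin '-' '-').mp h))
              have hc2 : ¬ (s.getD i ' ' = '/' ∧ (s.drop (i + 1)).take 1 = ['*']) :=
                fun h => hbc ((pvBridge2 s i '/' '*').mpr ((pvTwoChar s i hin '/' '*').mp h))
              rw [hA, pvB_m0_other _ _ _ _ _ hq hc1 hc2]
              exact ih (s.length - (i + 1)) (by omega) (i + 1) fa st acc rfl (by omega) (by omega)
      · have hdrop : s.drop i = [] := List.drop_eq_nil_of_le (by omega)
        rw [hdrop]
        simp [pvALoop, pvB_nil, show ¬ i < s.length from hin]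

-- ===== VERDICT (by name: the statement is the Claim_ definition above) =====
theorem find_protected_regions_py_spec : Claim_equal_find_protected_regions_py := by
  intro sql _
  unfold Spec_find_protected_regions_py find_protected_regions_py find_protected_regions_py_alt
  rw [pvMain sql.toList sql.toList.length 0 (sql.toList.length + 1) 0 [] rfl (Nat.zero_le _)
    (by omega)]
  rfl
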